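-- pv_equiv track=rewrite | github.com/gsarti/verbalized-rebus | scripts/process_data_calamita_2024.py | get_solution_key_and_sep
-- ===== SOURCE A (Python) =====
-- import string
--
-- def get_solution_key_and_sep(solution: str, punctuation: str = string.punctuation) -> tuple[str, str]:
--     curr_frase_len = []
--     for p in punctuation:
--         solution = solution.replace(p, f" {p} ")
--     words = solution.split()
--     for word in words:
--         if word in punctuation:
--             curr_frase_len.append(word)
--         else:
--             curr_frase_len.append(str(len(word)))
--     return " ".join(curr_frase_len), " ".join(words)
-- ===== SOURCE B (Python) =====
-- import string
--
--
-- def get_solution_key_and_sep(solution: str, punctuation: str = string.punctuation) -> tuple[str, str]: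
--     punct = set(punctuation)
--     tokens = []
--     cur = ""
--     for c in solution:
--         if c.isspace():
--             if cur:
--                 tokens.append(cur)
--                 cur = ""
--         elif c in punct:
--             if cur:
--                 tokens.append(cur)
--                 cur = ""
--             tokens.append(c)
--         else:
--             cur += c
--     if cur:
--         tokens.append(cur)
--     labels = [t if t in punct else str(len(t)) for t in tokens]
--     return " ".join(labels), " ".join(tokens)
-- ===== Notes on version B (the rewrite author's own statement) =====
-- stated objective: faster
-- what changed: Instead of rewriting the string once per punctuation character (one full replace pass each, on a string that the padding keeps growing) and then splitting, B tokenizes the string in a single left-to-right scan that flushes the current word at whitespace and emits punctuation characters as standalone tokens, then labels each token directly.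
import Mathlib
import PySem

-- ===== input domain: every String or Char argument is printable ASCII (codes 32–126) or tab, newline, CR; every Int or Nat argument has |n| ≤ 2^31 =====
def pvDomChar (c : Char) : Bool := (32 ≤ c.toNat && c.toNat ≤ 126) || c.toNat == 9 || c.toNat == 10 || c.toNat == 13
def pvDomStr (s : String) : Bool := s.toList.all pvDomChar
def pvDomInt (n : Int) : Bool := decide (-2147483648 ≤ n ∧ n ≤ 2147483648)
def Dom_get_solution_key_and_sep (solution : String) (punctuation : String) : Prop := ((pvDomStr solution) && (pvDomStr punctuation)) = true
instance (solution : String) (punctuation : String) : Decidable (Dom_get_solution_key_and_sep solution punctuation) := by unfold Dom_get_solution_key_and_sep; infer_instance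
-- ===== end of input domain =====

-- B replaces A's one-replace-pass-per-punctuation-character rewrite + split by a single
-- left-to-right tokenizing scan; same return value, proved equivalent on all inputs in Dom.


-- ===== PORT A =====
-- literal transliteration of A: for p in punctuation: solution = solution.replace(p, " p ");
-- words = solution.split(); per-word loop appending word if `word in punctuation` (substring
-- test) else str(len(word)); " ".join of both lists.
def get_solution_key_and_sep (solution : String) (punctuation : String) : String × String :=
  let sol := punctuation.toList.foldl
    (fun s p => PySem.Str.replace s (String.ofList [p]) (String.ofList [' ', p, ' '])) solution
  let words := PySem.Str.split₀ sol
  let curr_frase_len := words.foldl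
    (fun acc word =>
      if PySem.Str.isIn word punctuation then acc ++ [word]
      else acc ++ [PySem.Int.toStr (PySem.Str.len word)]) []
  (PySem.Str.join " " curr_frase_len, PySem.Str.join " " words)

-- ===== PORT B =====
-- Python's `t in punct` where punct is a set of 1-character strings: true iff t is a single
-- character belonging to the set (exact: set membership of a longer string is False).
def pvTokenInSet (t : List Char) (punct : PySem.Set Char) : Bool :=
  match t with
  | [c] => PySem.Set.contains punct c
  | _ => false

-- one step of Source B's scan loop; state = (tokens so far, current word)
def pvScanStep (punct : PySem.Set Char) (st : List (List Char) × List Char) (c : Char) :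
    List (List Char) × List Char :=
  if PySem.Chars.isspace c then
    (if st.2.isEmpty then st else (st.1 ++ [st.2], []))
  else if PySem.Set.contains punct c then
    ((if st.2.isEmpty then st.1 else st.1 ++ [st.2]) ++ [[c]], [])
  else (st.1, st.2 ++ [c])

def get_solution_key_and_sep_alt (solution : String) (punctuation : String) : String × String :=
  let punct := PySem.Set.ofList punctuation.toList
  let st := solution.toList.foldl (pvScanStep punct) ([], [])
  let tokens := if st.2.isEmpty then st.1 else st.1 ++ [st.2]
  let labels := tokens.map (fun t =>
    if pvTokenInSet t punct then t else (PySem.Int.toStr ((t.length : Int))).toList)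
  (String.ofList (PySem.Chars.join [' '] labels), String.ofList (PySem.Chars.join [' '] tokens))

-- ===== PRECONDITION & SPEC =====
def Spec_get_solution_key_and_sep (solution : String) (punctuation : String) (out : String × String) : Prop := out = get_solution_key_and_sep_alt solution punctuation
instance (solution : String) (punctuation : String) (out : String × String) : Decidable (Spec_get_solution_key_and_sep solution punctuation out) := by unfold Spec_get_solution_key_and_sep; infer_instance

-- ===== CLAIM (what is proved, stated in full; the proofs are below) =====
def Claim_equal_get_solution_key_and_sep : Prop := ∀ (solution : String) (punctuation : String), Dom_get_solution_key_and_sep solution punctuation → Spec_get_solution_key_and_sep solution punctuation (get_solution_key_and_sep solution punctuation)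

-- ===== LEMMAS AND PROOFS =====

-- membership in the set built from a char list is membership in the list
lemma pvContains_ofList (Q : List Char) (c : Char) :
    PySem.Set.contains (PySem.Set.ofList Q) c = Q.contains c := by
  have h := PySem.Set.mem_ofList Q c
  simp only [PySem.Set.contains]
  by_cases hc : c ∈ Q <;> simp [hc, h]

-- replace with a single-character pattern is a flatMap
lemma pvReplace_go_single (p : Char) (new : List Char) :
    ∀ (l : List Char) (fuel : Nat) (acc : List Char), l.length ≤ fuel →
    PySem.Chars.replace.go [p] new fuel l acc
      = acc.reverse ++ l.flatMap (fun c => if c = p then new else [c]) := by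
  intro l
  induction l with
  | nil => intro fuel acc _; cases fuel <;> simp [PySem.Chars.replace.go]
  | cons c t ih =>
    intro fuel acc hf
    cases fuel with
    | zero => simp at hf
    | succ f =>
      have ht : t.length ≤ f := by simpa using hf
      by_cases hc : c = p
      · subst hc
        simp [PySem.Chars.replace.go, List.isPrefixOf, ih f _ ht]
      · have hpc : ¬ p = c := fun h => hc h.symm
        simp [PySem.Chars.replace.go, List.isPrefixOf, hpc, hc, ih f _ ht]

lemma pvReplace_single (p : Char) (new s : List Char) :
    PySem.Chars.replace s [p] new = s.flatMap (fun c => if c = p then new else [c]) := by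
  simp only [PySem.Chars.replace, List.isEmpty_cons, Bool.false_eq_true, if_false]
  simpa using pvReplace_go_single p new s s.length [] le_rfl

-- a single scan step only appends to the token accumulator
lemma pvStep_acc_append (punct : PySem.Set Char) (a x : List (List Char)) (cur : List Char)
    (c : Char) :
    pvScanStep punct (a ++ x, cur) c
      = (a ++ (pvScanStep punct (x, cur) c).1, (pvScanStep punct (x, cur) c).2) := by
  unfold pvScanStep
  by_cases hws : PySem.Chars.isspace c = true
  · by_cases hcur : cur.isEmpty = true <;> simp [hws, hcur]
  · by_cases hp : c ∈ punct
    · by_cases hcur : cur.isEmpty = true <;> simp [hws, hp, hcur]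
    · simp [hws, hp]

-- the scan only ever appends to the token accumulator
lemma pvScan_acc_append (punct : PySem.Set Char) :
    ∀ (s : List Char) (a x : List (List Char)) (cur : List Char),
    s.foldl (pvScanStep punct) (a ++ x, cur)
      = (a ++ (s.foldl (pvScanStep punct) (x, cur)).1, (s.foldl (pvScanStep punct) (x, cur)).2) := by
  intro s
  induction s with
  | nil => intro a x cur; simp
  | cons c t ih =>
    intro a x cur
    rw [List.foldl_cons, List.foldl_cons, pvStep_acc_append]
    exact ih a _ _

-- finish the scan state into the token list
def pvFin (st : List (List Char) × List Char) : List (List Char) :=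
  if st.2.isEmpty then st.1 else st.1 ++ [st.2]

lemma pvFin_append (a : List (List Char)) (st : List (List Char) × List Char) :
    pvFin (a ++ st.1, st.2) = a ++ pvFin st := by
  unfold pvFin; split <;> simp

-- split() is the scan with the empty punctuation set
lemma pvSplitGo_eq_scan :
    ∀ (s cur : List Char) (acc : List (List Char)),
    PySem.Chars.split₀.go s cur acc
      = acc.reverse ++ pvFin (s.foldl (pvScanStep (PySem.Set.ofList [])) ([], cur.reverse)) := by
  intro s
  induction s with
  | nil =>
    intro cur acc
    by_cases hcur : cur.isEmpty = true <;>
      simp [PySem.Chars.split₀.go, pvFin, hcur]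
  | cons c t ih =>
    intro cur acc
    by_cases hws : PySem.Chars.isspace c = true
    · by_cases hcur : cur.isEmpty = true
      · have hc : cur = [] := by simpa using hcur
        subst hc
        simp [PySem.Chars.split₀.go, hws, ih, pvScanStep]
      · have hc : cur.isEmpty = false := by simpa using hcur
        have hcrev : cur.reverse.isEmpty = false := by
          simp only [List.isEmpty_reverse]; exact hc
        simp only [PySem.Chars.split₀.go, hws, if_pos, hc, Bool.false_eq_true, if_false]
        rw [ih [] (cur.reverse :: acc)]
        simp only [List.foldl_cons]
        have hstep : pvScanStep (PySem.Set.ofList []) (([] : List (List Char)), cur.reverse) c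
            = ([cur.reverse] ++ [], []) := by
          simp [pvScanStep, hws, hcrev]
        rw [hstep, pvScan_acc_append (PySem.Set.ofList []) t [cur.reverse] [] []]
        rw [pvFin_append]
        simp
    · simp only [PySem.Chars.split₀.go, hws, Bool.false_eq_true, if_false]
      rw [ih (c :: cur) acc]
      simp [pvScanStep, hws]

-- one padded character is absorbed by the scan that knows about p
lemma pvScan_pad_char (Q : List Char) (p c : Char) (st : List (List Char) × List Char) :
    ((if c = p then [' ', p, ' '] else [c]).foldl (pvScanStep (PySem.Set.ofList Q)) st)
      = pvScanStep (PySem.Set.ofList (p :: Q)) st c := by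
  have hsp : PySem.Chars.isspace ' ' = true := by decide
  by_cases hcp : c = p
  · subst hcp
    simp only [if_pos]
    by_cases hws : PySem.Chars.isspace c = true
    · by_cases hcur : st.2 = [] <;>
        simp [pvScanStep, hsp, hws, hcur, List.isEmpty_iff]
    · by_cases hp : c ∈ Q
      · by_cases hcur : st.2 = [] <;>
          simp [pvScanStep, hsp, hws, hp, hcur, List.isEmpty_iff]
      · by_cases hcur : st.2 = [] <;>
          simp [pvScanStep, hsp, hws, hp, hcur, List.isEmpty_iff]
  · have hpc : ¬ c = p := hcp
    simp only [if_neg hcp, List.foldl_cons, List.foldl_nil]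
    by_cases hws : PySem.Chars.isspace c = true
    · simp [pvScanStep, hws]
    · simp [pvScanStep, hws, List.mem_cons, hpc]

-- padding a character is transparent to the scan
lemma pvScan_pad (Q : List Char) (p : Char) :
    ∀ (s : List Char) (st : List (List Char) × List Char),
    (s.flatMap (fun c => if c = p then [' ', p, ' '] else [c])).foldl
        (pvScanStep (PySem.Set.ofList Q)) st
      = s.foldl (pvScanStep (PySem.Set.ofList (p :: Q))) st := by
  intro s
  induction s with
  | nil => intro st; simp
  | cons c t ih =>
    intro st
    simp only [List.flatMap_cons, List.foldl_append, List.foldl_cons]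
    rw [pvScan_pad_char Q p c st, ih]

-- the A-side replace loop followed by the plain scan equals the punctuation-aware scan
lemma pvMain (Q : List Char) :
    ∀ (s : List Char) (st : List (List Char) × List Char),
    (Q.foldl (fun s p => s.flatMap (fun c => if c = p then [' ', p, ' '] else [c])) s).foldl
        (pvScanStep (PySem.Set.ofList [])) st
      = s.foldl (pvScanStep (PySem.Set.ofList Q)) st := by
  induction Q with
  | nil => intro s st; rfl
  | cons p Q ih =>
    intro s st
    simp only [List.foldl_cons]
    rw [ih _ st, pvScan_pad]

-- every token is a punctuation singleton or a nonempty run avoiding Q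
def pvGoodTok (Q : List Char) (w : List Char) : Prop :=
  (∃ c ∈ Q, w = [c]) ∨ (w ≠ [] ∧ ∀ x ∈ w, x ∉ Q)

lemma pvTokens_good (Q : List Char) :
    ∀ (s : List Char) (acc : List (List Char)) (cur : List Char),
    (∀ w ∈ acc, pvGoodTok Q w) → (∀ x ∈ cur, x ∉ Q) →
    ∀ w ∈ pvFin (s.foldl (pvScanStep (PySem.Set.ofList Q)) (acc, cur)), pvGoodTok Q w := by
  intro s
  induction s with
  | nil =>
    intro acc cur hacc hcur
    unfold pvFin
    by_cases hc : cur.isEmpty = true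
    · simp only [List.foldl_nil, hc, if_pos]; exact hacc
    · have hne : cur ≠ [] := by simpa using hc
      simp only [List.foldl_nil, hc, Bool.false_eq_true, if_false]
      intro w hw
      rcases List.mem_append.mp hw with h | h
      · exact hacc w h
      · have : w = cur := by simpa using h
        subst this
        exact Or.inr ⟨hne, hcur⟩
  | cons c t ih =>
    intro acc cur hacc hcur
    rw [List.foldl_cons]
    by_cases hws : PySem.Chars.isspace c = true
    · by_cases hc : cur.isEmpty = true
      · have hcur0 : cur = [] := by simpa using hc
        subst hcur0
        simp only [pvScanStep, hws, if_pos, List.isEmpty_nil]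
        exact ih acc [] hacc (by simp)
      · have hne : cur ≠ [] := by simpa using hc
        simp only [pvScanStep, hws, if_pos, hc, Bool.false_eq_true, if_false]
        refine ih (acc ++ [cur]) [] ?_ (by simp)
        intro w hw
        rcases List.mem_append.mp hw with h | h
        · exact hacc w h
        · have : w = cur := by simpa using h
          subst this
          exact Or.inr ⟨hne, hcur⟩
    · by_cases hp : PySem.Set.contains (PySem.Set.ofList Q) c = true
      · have hcQ : c ∈ Q := by
          have := pvContains_ofList Q c
          rw [this] at hp
          simpa using hp
        simp only [pvScanStep, hws, Bool.false_eq_true, if_false, hp, if_pos]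
        refine ih _ [] ?_ (by simp)
        intro w hw
        rcases List.mem_append.mp hw with h | h
        · by_cases hc : cur.isEmpty = true
          · rw [if_pos hc] at h
            exact hacc w h
          · rw [if_neg hc] at h
            rcases List.mem_append.mp h with h' | h'
            · exact hacc w h'
            · have : w = cur := by simpa using h'
              subst this
              exact Or.inr ⟨by simpa using hc, hcur⟩
        · have : w = [c] := by simpa using h
          subst this
          exact Or.inl ⟨c, hcQ, rfl⟩
      · have hcQ : c ∉ Q := by
          have := pvContains_ofList Q c
          rw [this] at hp
          simpa using hp
        simp only [pvScanStep, hws, Bool.false_eq_true, if_false, hp]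
        refine ih acc (cur ++ [c]) hacc ?_
        intro x hx
        rcases List.mem_append.mp hx with h | h
        · exact hcur x h
        · have : x = c := by simpa using h
          subst this
          exact hcQ

-- the string-level replace loop, seen on character lists
lemma pvAFold_toList (P : List Char) :
    ∀ (solution : String),
    (P.foldl (fun s p => PySem.Str.replace s (String.ofList [p]) (String.ofList [' ', p, ' ']))
        solution).toList
      = P.foldl (fun s p => s.flatMap (fun c => if c = p then [' ', p, ' '] else [c]))
          solution.toList := by
  induction P with
  | nil => intro solution; rfl
  | cons p P ih =>
    intro solution
    simp only [List.foldl_cons]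
    rw [ih, PySem.Str.toList_replace, String.toList_ofList, String.toList_ofList,
      pvReplace_single]

-- labels agree on every well-shaped token
lemma pvLabel_eq (P w : List Char) (h : pvGoodTok P w) :
    (if PySem.Chars.isIn w P = true then w else (PySem.Int.toStr ((w.length : Int))).toList)
      = (if pvTokenInSet w (PySem.Set.ofList P) = true then w
         else (PySem.Int.toStr ((w.length : Int))).toList) := by
  rcases h with ⟨c, hcP, rfl⟩ | ⟨hne, hrun⟩
  · have h1 : PySem.Chars.isIn [c] P = true :=
      (PySem.Chars.isIn_iff_infix _ _).mpr ((List.singleton_infix_iff c P).mpr hcP)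
    have h2 : pvTokenInSet [c] (PySem.Set.ofList P) = true := by
      simp [pvTokenInSet, hcP]
    rw [h1, h2]
  · have h1 : PySem.Chars.isIn w P = false := by
      rw [PySem.Chars.isIn_eq_false_iff]
      intro hinf
      rcases List.exists_mem_of_ne_nil w hne with ⟨x, hx⟩
      exact hrun x hx (hinf.subset hx)
    have h2 : pvTokenInSet w (PySem.Set.ofList P) = false := by
      match w, hne with
      | [x], _ =>
        have : x ∉ P := hrun x (by simp)
        simp [pvTokenInSet, this]
      | (x :: y :: r), _ => simp [pvTokenInSet]
    rw [h1, h2]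

-- ===== VERDICT (by name: the statement is the Claim_ definition above) =====
set_option maxHeartbeats 1000000 in
theorem get_solution_key_and_sep_spec : Claim_equal_get_solution_key_and_sep := by
  intro solution punctuation _
  unfold Spec_get_solution_key_and_sep get_solution_key_and_sep get_solution_key_and_sep_alt
  simp only []
  set P := punctuation.toList with hP
  set sol := P.foldl
    (fun s p => PySem.Str.replace s (String.ofList [p]) (String.ofList [' ', p, ' '])) solution
    with hsol
  set words := PySem.Str.split₀ sol with hwords
  set st := solution.toList.foldl (pvScanStep (PySem.Set.ofList P)) ([], []) with hst
  have htok : words.map String.toList = pvFin st := by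
    rw [hwords, PySem.Str.split₀_map_toList, hsol, pvAFold_toList]
    have hsp : PySem.Chars.split₀
        (P.foldl (fun s p => s.flatMap (fun c => if c = p then [' ', p, ' '] else [c]))
          solution.toList)
        = pvFin ((P.foldl (fun s p => s.flatMap (fun c => if c = p then [' ', p, ' '] else [c]))
            solution.toList).foldl (pvScanStep (PySem.Set.ofList [])) ([], [])) := by
      have := pvSplitGo_eq_scan
        (P.foldl (fun s p => s.flatMap (fun c => if c = p then [' ', p, ' '] else [c]))
          solution.toList) [] []
      simpa [PySem.Chars.split₀] using this
    rw [hsp, pvMain P solution.toList ([], [])]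
  have hgood : ∀ w ∈ pvFin st, pvGoodTok P w := by
    rw [hst]
    exact pvTokens_good P solution.toList [] [] (by simp) (by simp)
  have hlabels : (words.foldl
      (fun acc word =>
        if PySem.Str.isIn word punctuation then acc ++ [word]
        else acc ++ [PySem.Int.toStr (PySem.Str.len word)]) []).map String.toList
      = (pvFin st).map (fun t =>
          if pvTokenInSet t (PySem.Set.ofList P) = true then t
          else (PySem.Int.toStr ((t.length : Int))).toList) := by
    have hfold : words.foldl
        (fun acc word =>
          if PySem.Str.isIn word punctuation then acc ++ [word]
          else acc ++ [PySem.Int.toStr (PySem.Str.len word)]) []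
        = words.map (fun word =>
            if PySem.Str.isIn word punctuation then word
            else PySem.Int.toStr (PySem.Str.len word)) := by
      have hfun : (fun (acc : List String) (word : String) =>
          if PySem.Str.isIn word punctuation then acc ++ [word]
          else acc ++ [PySem.Int.toStr (PySem.Str.len word)])
          = (fun acc word => acc ++ [if PySem.Str.isIn word punctuation then word
              else PySem.Int.toStr (PySem.Str.len word)]) := by
        funext acc word
        split <;> rfl
      rw [hfun, PySem.List.foldl_append_singleton_eq_map]
      simp
    rw [hfold, ← htok, List.map_map, List.map_map]
    refine List.map_congr_left ?_
    intro w hw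
    have hgw : pvGoodTok P w.toList := by
      have : w.toList ∈ pvFin st := by
        rw [← htok]
        exact List.mem_map_of_mem hw
      exact hgood _ this
    have := pvLabel_eq P w.toList hgw
    simp only [Function.comp_apply]
    rw [← this]
    rw [PySem.Str.isIn_eq]
    rw [hP]
    by_cases hin : PySem.Chars.isIn w.toList punctuation.toList = true
    · simp [hin]
    · simp only [hin, Bool.false_eq_true, if_false]
      rw [PySem.Str.len_eq]
  have hone : (" " : String).toList = [' '] := rfl
  refine Prod.ext ?_ ?_
  · refine String.toList_inj.mp ?_
    rw [String.toList_ofList, PySem.Str.toList_join, hlabels, hone]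
    rfl
  · refine String.toList_inj.mp ?_
    rw [String.toList_ofList, PySem.Str.toList_join, htok, hone]
    rfl
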